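-- pv_equiv track=rewrite | github.com/isa-nurbek/leet-code-challenges | Arrays/02-Medium/14-Sweet And Savory/solution.py | sweet_and_savory
-- ===== SOURCE A (Python) =====
-- def sweet_and_savory(dishes, target):
--     # Separate the dishes into sweet (negative values) and savory (positive values)
--     # Sort sweet dishes in ascending order of their absolute values (closest to zero first)
--     sweet_dishes = sorted([dish for dish in dishes if dish < 0], key=abs)
--
--     # Sort savory dishes in ascending order (smallest positive first)
--     savory_dishes = sorted([dish for dish in dishes if dish > 0])
--
--     # Initialize the best_pair to store the best combination of sweet and savory dishes
--     best_pair = [0, 0]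
--
--     # Initialize the best_difference to store the smallest difference between the sum and the target
--     best_difference = float("inf")
--
--     # Initialize pointers for sweet_dishes and savory_dishes
--     sweet_index, savory_index = 0, 0
--
--     # Use a two-pointer technique to find the best pair
--     while sweet_index < len(sweet_dishes) and savory_index < len(savory_dishes):
--         # Calculate the current sum of the sweet and savory dishes at the current indices
--         current_sum = sweet_dishes[sweet_index] + savory_dishes[savory_index]
--
--         # Check if the current sum is less than or equal to the target
--         if current_sum <= target:
--             # Calculate the difference between the target and the current sum
--             current_difference = target - current_sum
--
--             # If this difference is smaller than the best_difference found so far,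
--             # update the best_difference and best_pair
--             if current_difference < best_difference:
--                 best_difference = current_difference
--                 best_pair = [sweet_dishes[sweet_index], savory_dishes[savory_index]]
--
--             # Move the savory_index pointer to the right to try a larger savory dish
--             savory_index += 1
--         else:
--             # If the current sum is greater than the target, move the sweet_index pointer
--             # to the right to try a smaller sweet dish (since sweet dishes are negative)
--             sweet_index += 1
--
--     # Return the best pair of sweet and savory dishes that sum closest to the target
--     return best_pair
-- ===== SOURCE B (Python) =====
-- def sweet_and_savory(dishes, target):
--     # Same preprocessing as the statement requires: sweet by absolute value
--     # ascending, savory ascending.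
--     sweet_dishes = sorted([dish for dish in dishes if dish < 0], key=abs)
--     savory_dishes = sorted([dish for dish in dishes if dish > 0])
--
--     best_pair = [0, 0]
--     best_difference = None  # None means "no valid pair found yet"
--
--     # Exhaustively try every sweet/savory combination, keeping the first
--     # pair (in this traversal order) that achieves the smallest difference
--     # without exceeding the target.
--     for sweet in sweet_dishes:
--         for savory in savory_dishes:
--             current_sum = sweet + savory
--             if current_sum <= target:
--                 current_difference = target - current_sum
--                 if best_difference is None or current_difference < best_difference:
--                     best_difference = current_difference
--                     best_pair = [sweet, savory]
--     return best_pair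
-- ===== Notes on version B (the rewrite author's own statement) =====
-- stated objective: simpler
-- what changed: Replaces the two-pointer while-loop over index state with a plain exhaustive nested for-loop over all sweet/savory pairs (same sort orders, strict-improvement update), trading the O(n log n) pointer walk for an obviously correct O(n^2) scan.
import Mathlib
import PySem

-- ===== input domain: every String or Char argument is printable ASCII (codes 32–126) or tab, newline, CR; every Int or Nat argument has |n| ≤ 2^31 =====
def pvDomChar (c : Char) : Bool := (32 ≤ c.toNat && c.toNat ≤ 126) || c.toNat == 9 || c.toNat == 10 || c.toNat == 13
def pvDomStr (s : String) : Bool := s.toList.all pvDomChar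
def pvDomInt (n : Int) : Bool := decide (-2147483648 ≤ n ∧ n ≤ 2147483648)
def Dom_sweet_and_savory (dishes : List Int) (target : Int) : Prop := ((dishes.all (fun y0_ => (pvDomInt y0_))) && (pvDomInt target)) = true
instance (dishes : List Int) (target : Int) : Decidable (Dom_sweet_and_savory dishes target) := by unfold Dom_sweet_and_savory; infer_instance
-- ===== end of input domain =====

-- B replaces A's two-pointer index walk by an exhaustive nested scan over the same
-- sorted lists (simpler control flow; same return value, proved below).

-- ===== PORT A =====
-- float("inf") is modeled as `none`: `pvLtInf x bd` is Python's `x < best_difference`,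
-- exact because every stored difference is a finite integer and inf exceeds them all.
def pvLtInf (x : Int) : Option Int → Bool
  | none => true
  | some b => decide (x < b)

-- the while-loop of A, with the two indices and the two best-so-far variables as state;
-- list indexing uses getD, exact here since the loop guard keeps both indices in range
def pvLoopA (sweet savory : List Int) (target : Int) (i j : Nat)
    (bestPair : List Int) (bestDiff : Option Int) : List Int :=
  if h : i < sweet.length ∧ j < savory.length then
    let cur := sweet.getD i 0 + savory.getD j 0
    if cur ≤ target then
      if pvLtInf (target - cur) bestDiff then
        pvLoopA sweet savory target i (j+1)
          [sweet.getD i 0, savory.getD j 0] (some (target - cur))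
      else
        pvLoopA sweet savory target i (j+1) bestPair bestDiff
    else
      pvLoopA sweet savory target (i+1) j bestPair bestDiff
  else bestPair
termination_by (sweet.length - i) + (savory.length - j)
decreasing_by all_goals omega

def sweet_and_savory (dishes : List Int) (target : Int) : List Int :=
  pvLoopA (PySem.List.sorted (dishes.filter (fun d => d < 0)) (fun d => |d|) false)
          (PySem.List.sorted (dishes.filter (fun d => d > 0)) (fun x => x) false)
          target 0 0 [0, 0] none

-- ===== PORT B =====
-- one inner-loop body of Source B: try pair (s, v), update best state on strict improvement
def pvStep (target s : Int) (st : List Int × Option Int) (v : Int) : List Int × Option Int :=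
  if s + v ≤ target then
    match st.2 with
    | none => ([s, v], some (target - (s + v)))
    | some b => if target - (s + v) < b then ([s, v], some (target - (s + v))) else st
  else st

def sweet_and_savory_alt (dishes : List Int) (target : Int) : List Int :=
  let sweet := PySem.List.sorted (dishes.filter (fun d => d < 0)) (fun d => |d|) false
  let savory := PySem.List.sorted (dishes.filter (fun d => d > 0)) (fun x => x) false
  (sweet.foldl (fun st s => savory.foldl (pvStep target s) st) ([0, 0], (none : Option Int))).1

-- ===== PRECONDITION & SPEC =====
def Spec_sweet_and_savory (dishes : List Int) (target : Int) (out : List Int) : Prop := out = sweet_and_savory_alt dishes target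
instance (dishes : List Int) (target : Int) (out : List Int) : Decidable (Spec_sweet_and_savory dishes target out) := by unfold Spec_sweet_and_savory; infer_instance

-- ===== CLAIM (what is proved, stated in full; the proofs are below) =====
def Claim_equal_sweet_and_savory : Prop := ∀ (dishes : List Int) (target : Int), Dom_sweet_and_savory dishes target → Spec_sweet_and_savory dishes target (sweet_and_savory dishes target)

-- ===== LEMMAS AND PROOFS =====

-- remaining brute-force work of B seen from the two-pointer position (i, j):
-- finish row i from column j on, then all later rows in full
def pvRest (S V : List Int) (t : Int) (i j : Nat)
    (st : List Int × Option Int) : List Int × Option Int :=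
  match S.drop i with
  | [] => st
  | s :: rest =>
      rest.foldl (fun st s => V.foldl (pvStep t s) st)
        ((V.drop j).foldl (pvStep t s) st)

-- two-pointer invariant: every savory column already passed is a no-op for every
-- remaining sweet row (its difference cannot beat the recorded best)
def pvInv (S V : List Int) (t : Int) (i j : Nat) (d : Option Int) : Prop :=
  (∀ v ∈ V.take j, ∀ s ∈ S.drop i, ∀ b : Int, d = some b → s + v + b ≤ t) ∧
  (V.take j ≠ [] → d ≠ none)

lemma pvStep_noop_big {t s v : Int} {st : List Int × Option Int}
    (h : ¬ s + v ≤ t) : pvStep t s st v = st := by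
  simp [pvStep, h]

lemma pvStep_noop_small {t s v b : Int} {st : List Int × Option Int}
    (hb : st.2 = some b) (h : s + v + b ≤ t) : pvStep t s st v = st := by
  have h2 : ¬ (t - (s + v) < b) := by omega
  simp [pvStep, hb, h2]

lemma pvFoldl_noop_big {t s : Int} {W : List Int} {st : List Int × Option Int}
    (h : ∀ v ∈ W, ¬ s + v ≤ t) : W.foldl (pvStep t s) st = st := by
  induction W with
  | nil => rfl
  | cons v W ih =>
      simp only [List.foldl_cons]
      rw [pvStep_noop_big (h v (by simp))]
      exact ih (fun v' hv' => h v' (by simp [hv']))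

lemma pvFoldl_noop_small {t s b : Int} {W : List Int} {st : List Int × Option Int}
    (hb : st.2 = some b) (h : ∀ v ∈ W, s + v + b ≤ t) : W.foldl (pvStep t s) st = st := by
  induction W with
  | nil => rfl
  | cons v W ih =>
      simp only [List.foldl_cons]
      rw [pvStep_noop_small hb (h v (by simp))]
      exact ih (fun v' hv' => h v' (by simp [hv']))

lemma pvFoldl_fix {α β : Type} {f : β → α → β} {L : List α} {st : β}
    (h : ∀ a ∈ L, f st a = st) : L.foldl f st = st := by
  induction L with
  | nil => rfl
  | cons a L ih =>
      simp only [List.foldl_cons]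
      rw [h a (by simp)]
      exact ih (fun a' ha' => h a' (by simp [ha']))

-- a successful comparison (s+v ≤ t) leaves a finite best ≤ the current difference
-- and never larger than the previous best
lemma pvStep_hit {t s v : Int} {st : List Int × Option Int} (h : s + v ≤ t) :
    ∃ b', (pvStep t s st v).2 = some b' ∧ b' ≤ t - (s + v) ∧
      (∀ b, st.2 = some b → b' ≤ b) := by
  unfold pvStep
  rw [if_pos h]
  cases hst : st.2 with
  | none => exact ⟨t - (s + v), by simp, le_refl _, by simp⟩
  | some b =>
      by_cases hlt : t - (s + v) < b
      · refine ⟨t - (s + v), by simp [hlt], le_refl _, ?_⟩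
        intro b0 h0
        simp at h0
        omega
      · refine ⟨b, by simp [hlt, hst], by omega, ?_⟩
        intro b0 h0
        simp at h0
        omega

-- main invariant lemma: from any position (i, j) whose passed columns satisfy the
-- invariant, the two-pointer loop computes exactly B's remaining brute-force fold
lemma pvTerm (S V : List Int) (t : Int) (i j : Nat) (bp : List Int) (bd : Option Int)
    (hij : ¬ (i < S.length ∧ j < V.length)) (hinv : pvInv S V t i j bd) :
    (pvRest S V t i j (bp, bd)).1 = bp := by
  unfold pvRest
  by_cases hi : S.length ≤ i
  · rw [List.drop_eq_nil_of_le hi]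
  · have hi' : i < S.length := by omega
    have hj : V.length ≤ j := by
      rcases not_and_or.mp hij with h | h
      · omega
      · omega
    have hdropS : S.drop i = S[i] :: S.drop (i + 1) := List.drop_eq_getElem_cons hi'
    rw [hdropS]
    simp only
    rw [List.drop_eq_nil_of_le hj, List.foldl_nil]
    have hfix : ∀ s' ∈ S.drop (i + 1), V.foldl (pvStep t s') (bp, bd) = (bp, bd) := by
      intro s' hs'
      cases hVe : V with
      | nil => rfl
      | cons v0 V' =>
          have htk : V.take j = V := List.take_of_length_le hj
          have hne : V.take j ≠ [] := by rw [htk, hVe]; simp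
          have hbd : bd ≠ none := hinv.2 hne
          obtain ⟨b, hb⟩ := Option.ne_none_iff_exists'.mp hbd
          rw [← hVe]
          refine pvFoldl_noop_small (st := (bp, bd)) hb ?_
          intro v hv
          refine hinv.1 v (by rw [htk]; exact hv) s' ?_ b hb
          rw [hdropS]
          exact List.mem_cons_of_mem _ hs'
    rw [pvFoldl_fix hfix]

lemma pvMain (S V : List Int) (t : Int)
    (hS : S.Pairwise (fun a b => b ≤ a)) (hV : V.Pairwise (fun a b => a ≤ b)) :
    ∀ n i j (bp : List Int) (bd : Option Int),
      (S.length - i) + (V.length - j) ≤ n → pvInv S V t i j bd →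
      pvLoopA S V t i j bp bd = (pvRest S V t i j (bp, bd)).1 := by
  intro n
  induction n with
  | zero =>
      intro i j bp bd hn hinv
      have hij : ¬ (i < S.length ∧ j < V.length) := by omega
      rw [pvLoopA, dif_neg hij, pvTerm S V t i j bp bd hij hinv]
  | succ n ih =>
      intro i j bp bd hn hinv
      by_cases hij : i < S.length ∧ j < V.length
      · obtain ⟨hi, hj⟩ := hij
        have hgS : S.getD i 0 = S[i] := List.getD_eq_getElem S 0 hi
        have hgV : V.getD j 0 = V[j] := List.getD_eq_getElem V 0 hj
        have hdropS : S.drop i = S[i] :: S.drop (i + 1) := List.drop_eq_getElem_cons hi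
        have hdropV : V.drop j = V[j] :: V.drop (j + 1) := List.drop_eq_getElem_cons hj
        have hpairS : (S.drop i).Pairwise (fun a b => b ≤ a) :=
          hS.sublist (List.drop_sublist i S)
        have hpairV : (V.drop j).Pairwise (fun a b => a ≤ b) :=
          hV.sublist (List.drop_sublist j V)
        have hmonoS : ∀ s' ∈ S.drop i, s' ≤ S[i] := by
          rw [hdropS]
          intro s' hs'
          rcases List.mem_cons.mp hs' with rfl | hs'
          · exact le_refl _
          · exact (List.pairwise_cons.mp (hdropS ▸ hpairS)).1 s' hs'
        have hmonoV : ∀ v' ∈ V.drop j, V[j] ≤ v' := by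
          rw [hdropV]
          intro v' hv'
          rcases List.mem_cons.mp hv' with rfl | hv'
          · exact le_refl _
          · exact (List.pairwise_cons.mp (hdropV ▸ hpairV)).1 v' hv'
        by_cases hcur : S.getD i 0 + V.getD j 0 ≤ t
        · -- savory pointer advances; the pair (S[i], V[j]) is processed by pvStep
          have hstep : pvLoopA S V t i j bp bd =
              pvLoopA S V t i (j + 1) (pvStep t S[i] (bp, bd) V[j]).1
                (pvStep t S[i] (bp, bd) V[j]).2 := by
            rw [pvLoopA, dif_pos ⟨hi, hj⟩]
            simp only [hgS, hgV] at hcur ⊢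
            rw [if_pos hcur]
            cases hbd : bd with
            | none => simp [pvLtInf, pvStep, hcur]
            | some b =>
                by_cases hlt : t - (S[i] + V[j]) < b
                · simp [pvLtInf, pvStep, hcur, hlt]
                · simp [pvLtInf, pvStep, hcur, hlt]
          rw [hgS, hgV] at hcur
          obtain ⟨b', hb', hble, hbmon⟩ :=
            pvStep_hit (st := (bp, bd)) (t := t) (s := S[i]) (v := V[j]) hcur
          have hinv' : pvInv S V t i (j + 1) (pvStep t S[i] (bp, bd) V[j]).2 := by
            constructor
            · intro v hv s' hs' b0 hb0
              rw [hb'] at hb0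
              injection hb0 with hb0
              subst hb0
              rw [List.take_add_one] at hv
              rcases List.mem_append.mp hv with hv | hv
              · rcases hbmon with hbmon
                rcases hbd : bd with _ | b1
                · -- bd = none: no passed column may be nonempty
                  rcases List.eq_nil_or_concat (V.take j) with he | ⟨_, _, he⟩
                  · rw [he] at hv; cases hv
                  · exact absurd (hinv.2 (by rw [he]; simp)) (by simp [hbd])
                · have := hinv.1 v hv s' hs' b1 hbd
                  have hb1 := hbmon b1 (by simp [hbd])
                  omega
              · have hvj : v = V[j] := by
                  have : V[j]? = some V[j] := List.getElem?_eq_getElem hj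
                  rw [this] at hv
                  simpa using hv
                subst hvj
                have := hmonoS s' hs'
                omega
            · intro _
              rw [hb']
              simp
          have hrest : pvRest S V t i j (bp, bd) =
              pvRest S V t i (j + 1) (pvStep t S[i] (bp, bd) V[j]) := by
            unfold pvRest
            rw [hdropS]
            simp only
            rw [hdropV, List.foldl_cons]
          rw [hstep, hrest]
          exact ih i (j + 1) _ _ (by omega) hinv'
        · -- sweet pointer advances; every remaining savory overshoots with S[i]
          have hstep : pvLoopA S V t i j bp bd = pvLoopA S V t (i + 1) j bp bd := by
            rw [pvLoopA, dif_pos ⟨hi, hj⟩]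
            simp only
            rw [if_neg hcur]
          rw [hgS, hgV] at hcur
          have hnoopRow : (V.drop j).foldl (pvStep t S[i]) (bp, bd) = (bp, bd) := by
            refine pvFoldl_noop_big ?_
            intro v' hv'
            have := hmonoV v' hv'
            omega
          have hinv' : pvInv S V t (i + 1) j bd := by
            constructor
            · intro v hv s' hs' b0 hb0
              refine hinv.1 v hv s' ?_ b0 hb0
              rw [hdropS]
              exact List.mem_cons_of_mem _ hs'
            · exact hinv.2
          have hrest : pvRest S V t i j (bp, bd) = pvRest S V t (i + 1) j (bp, bd) := by
            unfold pvRest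
            rw [hdropS]
            simp only
            rw [hnoopRow]
            cases hdropS' : S.drop (i + 1) with
            | nil => rfl
            | cons s2 rest2 =>
                rw [List.foldl_cons]
                simp only
                have htksplit : V = V.take j ++ V.drop j := (List.take_append_drop j V).symm
                have hnoopTake : (V.take j).foldl (pvStep t s2) (bp, bd) = (bp, bd) := by
                  cases hTk : V.take j with
                  | nil => rfl
                  | cons v0 V' =>
                      have hbd : bd ≠ none := hinv.2 (by rw [hTk]; simp)
                      obtain ⟨b, hb⟩ := Option.ne_none_iff_exists'.mp hbd
                      rw [← hTk]
                      refine pvFoldl_noop_small (st := (bp, bd)) hb ?_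
                      intro v hv
                      refine hinv.1 v hv s2 ?_ b hb
                      rw [hdropS, hdropS']
                      exact List.mem_cons_of_mem _ (List.mem_cons_self ..)
                have hrow : V.foldl (pvStep t s2) (bp, bd) =
                    (V.drop j).foldl (pvStep t s2) (bp, bd) := by
                  conv_lhs => rw [htksplit]
                  rw [List.foldl_append, hnoopTake]
                rw [hrow]
          rw [hstep, hrest]
          exact ih (i + 1) j _ _ (by omega) hinv'
      · rw [pvLoopA, dif_neg hij, pvTerm S V t i j bp bd hij hinv]

theorem pvTop (dishes : List Int) (target : Int) :
    sweet_and_savory dishes target = sweet_and_savory_alt dishes target := by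
  unfold sweet_and_savory sweet_and_savory_alt
  set S := PySem.List.sorted (dishes.filter (fun d => d < 0)) (fun d => |d|) false with hSdef
  set V := PySem.List.sorted (dishes.filter (fun d => d > 0)) (fun x => x) false with hVdef
  have hSneg : ∀ x ∈ S, x < 0 := by
    intro x hx
    have : x ∈ dishes.filter (fun d => d < 0) := (PySem.List.mem_sorted _ _ _ _).mp hx
    simpa using (List.mem_filter.mp this).2
  have hS : S.Pairwise (fun a b => b ≤ a) := by
    have habs : S.Pairwise (fun a b => |a| ≤ |b|) := PySem.List.sorted_pairwise _ _
    refine List.Pairwise.imp_of_mem ?_ habs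
    intro a b ha hb hab
    have ha' := hSneg a ha
    have hb' := hSneg b hb
    rw [abs_of_neg ha', abs_of_neg hb'] at hab
    omega
  have hV : V.Pairwise (fun a b => a ≤ b) := PySem.List.sorted_pairwise _ _
  have hinv0 : pvInv S V target 0 0 none := by
    constructor
    · intro v hv; simp at hv
    · intro h; simp at h
  have hmain := pvMain S V target hS hV (S.length + V.length) 0 0 [0, 0] none
    (by omega) hinv0
  rw [hmain]
  unfold pvRest
  cases hSe : S with
  | nil => simp
  | cons s rest =>
      simp only [List.drop_zero, List.foldl_cons]

-- ===== VERDICT (by name: the statement is the Claim_ definition above) =====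
theorem sweet_and_savory_spec : Claim_equal_sweet_and_savory := by
  intro dishes target _
  unfold Spec_sweet_and_savory
  exact pvTop dishes target
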